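-- pv_equiv track=rewrite | github.com/matyexd/traveling-salesman-task | utils/correctUploadedFile.py | isCorrectUploadedFile
-- ===== SOURCE A (Python) =====
-- def isCorrectUploadedFile(matrix):
--     try:
--         row = len(matrix)
--         if (row < 2):
--             return False
--         for i in range(len(matrix)):
--             for j in range(len(matrix[i])):
--                 if (matrix[i][j] != matrix[j][i]):
--                     return False
--                 if ((i == j) and (matrix[i][j] != 0)):
--                     return False
--         return True
--     except:
--         return False
-- ===== SOURCE B (Python) =====
-- def isCorrectUploadedFile(matrix):
--     if len(matrix) < 2:
--         return False
--     transpose = list(map(list, zip(*matrix)))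
--     return matrix == transpose and all(matrix[i][i] == 0 for i in range(len(matrix)))
-- ===== Notes on version B (the rewrite author's own statement) =====
-- stated objective: idiomatic
-- what changed: Replaced the index-pair nested scan with a build-the-transpose-then-compare structure (matrix == zip-transpose) plus a single diagonal pass, which also makes the check reject jagged matrices.
-- intended difference: On jagged (non-square) matrices with at least 2 rows whose existing index pairs are symmetric with zero checked diagonal (e.g. [[0,1],[1]]), A returns True because its inner loop only visits columns that exist in each row, while B returns False; a distance matrix must be square, so False is the intended value. — e.g. on isCorrectUploadedFile([[0, 1], [1]]): A returns true, B returns false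
import Mathlib
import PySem

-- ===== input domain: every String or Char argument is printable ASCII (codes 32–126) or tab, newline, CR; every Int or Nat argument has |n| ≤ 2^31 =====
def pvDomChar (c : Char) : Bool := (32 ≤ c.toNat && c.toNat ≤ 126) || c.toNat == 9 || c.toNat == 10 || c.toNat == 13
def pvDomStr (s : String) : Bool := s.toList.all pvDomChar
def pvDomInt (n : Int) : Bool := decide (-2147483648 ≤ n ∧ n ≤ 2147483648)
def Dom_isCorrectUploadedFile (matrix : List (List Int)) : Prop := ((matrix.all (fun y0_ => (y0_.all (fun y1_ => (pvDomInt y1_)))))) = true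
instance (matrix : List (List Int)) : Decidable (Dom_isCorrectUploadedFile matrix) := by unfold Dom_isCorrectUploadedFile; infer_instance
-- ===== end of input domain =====

-- B rebuilds the check as transpose-then-compare (matrix == zip-transpose) plus one diagonal pass;
-- unlike A it rejects jagged matrices (see D_ below).


-- ===== PORT A =====
-- inner loop 'for j in range(len(matrix[i]))': walks row i with its index j; an out-of-range
-- access matrix[j] or matrix[j][i] raises IndexError, which A's 'except' turns into False.
def innerA (m : List (List Int)) (i : Nat) (j : Nat) : List Int → Bool
  | [] => true
  | x :: rest =>                                 -- x = matrix[i][j]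
    match PySem.List.pyGet? m (j : Int) with
    | none => false                              -- IndexError → except → False
    | some rowj =>
      match PySem.List.pyGet? rowj (i : Int) with
      | none => false                            -- IndexError → except → False
      | some mji =>
        if x ≠ mji then false
        else if i = j ∧ x ≠ 0 then false
        else innerA m i (j+1) rest

-- outer loop 'for i in range(len(matrix))'; early 'return False' = short-circuit &&
def outerA (m : List (List Int)) (i : Nat) : List (List Int) → Bool
  | [] => true
  | rowi :: rest => innerA m i 0 rowi && outerA m (i+1) rest

def isCorrectUploadedFile (matrix : List (List Int)) : Bool :=
  if matrix.length < 2 then false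
  else outerA matrix 0 matrix

-- ===== PORT B =====
-- zip(*m): as many rows as the shortest row of m (none if m = []), column j = (r[j] for r in m)
def zipStar (m : List (List Int)) : List (List Int) :=
  match (m.map List.length).min? with
  | none => []
  | some k => (List.range k).map (fun j => m.map (fun r => r.getD j 0))  -- j < k ≤ each row length

def isCorrectUploadedFile_alt (matrix : List (List Int)) : Bool :=
  if matrix.length < 2 then false
  else
    decide (matrix = zipStar matrix) &&
      (List.range matrix.length).all (fun i => (matrix.getD i []).getD i 0 == 0)
      -- the diagonal access is only evaluated when matrix = transpose (so it is in range)

-- ===== PRECONDITION & SPEC =====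
-- On jagged (non-square) matrices with ≥ 2 rows whose existing index pairs are symmetric with
-- zero checked diagonal (e.g. [[0,1],[1]]), A returns True (its loops never reach the missing
-- entries) while B returns False; a distance matrix must be square, so False is intended.
def D_isCorrectUploadedFile (matrix : List (List Int)) : Prop :=
  2 ≤ matrix.length ∧ (matrix.any fun r => r.length < matrix.length) ∧
  ∀ i < matrix.length, let r := matrix.getD i []
    (matrix.take r.length).mapM (·[i]?) = some (r.set i 0)

instance (matrix : List (List Int)) : Decidable (D_isCorrectUploadedFile matrix) := by
  unfold D_isCorrectUploadedFile; infer_instance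

def Spec_isCorrectUploadedFile (matrix : List (List Int)) (out : Bool) : Prop :=
  ¬ D_isCorrectUploadedFile matrix → out = isCorrectUploadedFile_alt matrix
instance (matrix : List (List Int)) (out : Bool) : Decidable (Spec_isCorrectUploadedFile matrix out) := by unfold Spec_isCorrectUploadedFile; infer_instance

def pvDiffWitness_isCorrectUploadedFile : List (List Int) := [[0, 1], [1]]
def pvDiffWitnessOut_isCorrectUploadedFile : Bool × Bool := (true, false)

-- ===== CLAIM (what is proved, stated in full; the proofs are below) =====
def Claim_unchanged_isCorrectUploadedFile : Prop := ∀ (matrix : List (List Int)), Dom_isCorrectUploadedFile matrix → Spec_isCorrectUploadedFile matrix (isCorrectUploadedFile matrix)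
def Claim_changed_isCorrectUploadedFile : Prop := Dom_isCorrectUploadedFile (pvDiffWitness_isCorrectUploadedFile) ∧ D_isCorrectUploadedFile (pvDiffWitness_isCorrectUploadedFile) ∧ isCorrectUploadedFile (pvDiffWitness_isCorrectUploadedFile) = pvDiffWitnessOut_isCorrectUploadedFile.1 ∧ isCorrectUploadedFile_alt (pvDiffWitness_isCorrectUploadedFile) = pvDiffWitnessOut_isCorrectUploadedFile.2 ∧ pvDiffWitnessOut_isCorrectUploadedFile.1 ≠ pvDiffWitnessOut_isCorrectUploadedFile.2
def Claim_exact_isCorrectUploadedFile : Prop := ∀ (matrix : List (List Int)), Dom_isCorrectUploadedFile matrix → D_isCorrectUploadedFile matrix → isCorrectUploadedFile matrix ≠ isCorrectUploadedFile_alt matrix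

-- ===== LEMMAS AND PROOFS =====

-- the condition A's nested loops actually test: every index pair that EXISTS is symmetric,
-- and every diagonal entry that exists within its own row's length is zero
def AsymCond (m : List (List Int)) : Prop :=
  ∀ i < m.length, ∀ j < (m.getD i []).length,
    j < m.length ∧ i < (m.getD j []).length ∧
    (m.getD i []).getD j 0 = (m.getD j []).getD i 0 ∧
    (i = j → (m.getD i []).getD j 0 = 0)

def Squarem (m : List (List Int)) : Prop := ∀ r ∈ m, r.length = m.length

theorem mapM_opt_forall2 {α β : Type} (f : α → Option β) (xs : List α) (ys : List β) :
    xs.mapM f = some ys ↔ List.Forall₂ (fun a b => f a = some b) xs ys := by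
  induction xs generalizing ys with
  | nil =>
    simp only [List.mapM_nil, pure, List.forall₂_nil_left_iff]
    constructor
    · intro h; cases h; rfl
    · intro h; rw [h]
  | cons a as ih =>
    rw [List.mapM_cons]
    cases hfa : f a with
    | none =>
      constructor
      · intro h; simp at h
      · intro h
        cases h with
        | cons hab _ => rw [hfa] at hab; cases hab
    | some b =>
      cases hmapM : as.mapM f with
      | none =>
        constructor
        · intro h; simp at h
        · intro h
          cases h with
          | cons hab htail =>
            rw [← ih, hmapM] at htail; cases htail
      | some bs =>
        constructor
        · intro h
          simp at h
          subst h
          exact List.Forall₂.cons hfa ((ih bs).mp hmapM)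
        · intro h
          cases h with
          | cons hab htail =>
            rw [← ih, hmapM] at htail
            cases htail
            cases hab.symm.trans hfa
            rfl

theorem colCond_iff (m : List (List Int)) (i : Nat) (hi : i < m.length) :
    (m.take (m.getD i []).length).mapM (fun r => r[i]?) = some ((m.getD i []).set i 0) ↔
      ∀ j < (m.getD i []).length, j < m.length ∧ i < (m.getD j []).length ∧
        (m.getD i []).getD j 0 = (m.getD j []).getD i 0 ∧
        (i = j → (m.getD i []).getD j 0 = 0) := by
  rw [mapM_opt_forall2, List.forall₂_iff_get]
  set row := m.getD i [] with hrowdef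
  have hmi : row = m[i] := List.getD_eq_getElem _ _ hi
  constructor
  · rintro ⟨hlen, hent⟩ j hj
    have hlle : row.length ≤ m.length := by
      simp only [List.length_take, List.length_set] at hlen
      omega
    have hjm : j < m.length := by omega
    have hjt : j < (m.take row.length).length := by
      simp only [List.length_take]; omega
    have hjs : j < (row.set i 0).length := by
      simp only [List.length_set]; omega
    have h := hent j hjt hjs
    simp only [List.get_eq_getElem, List.getElem_take, List.getElem_set] at h
    obtain ⟨hil, hv⟩ := List.getElem?_eq_some_iff.mp h
    have hmj : m.getD j [] = m[j] := List.getD_eq_getElem _ _ hjm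
    refine ⟨hjm, by rw [hmj]; exact hil, ?_, fun hij => ?_⟩
    · by_cases hij : i = j
      · subst hij; rfl
      · rw [List.getD_eq_getElem _ _ hj, hmj, List.getD_eq_getElem _ _ hil, hv, if_neg hij]
    · subst hij
      rw [List.getD_eq_getElem _ _ hj]
      rw [if_pos rfl] at hv
      rw [← hv]
      exact List.getElem_of_eq hmi hj
  · intro h
    have hlle : row.length ≤ m.length := by
      rcases Nat.eq_zero_or_pos row.length with h0 | h0
      · omega
      · have := (h (row.length - 1) (by omega)).1
        omega
    refine ⟨by simp only [List.length_take, List.length_set]; omega, fun j hjt hjs => ?_⟩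
    have hj : j < row.length := by
      simp only [List.length_set] at hjs; exact hjs
    obtain ⟨hjm, hil, hsym, hdiag⟩ := h j hj
    have hmj : m.getD j [] = m[j] := List.getD_eq_getElem _ _ hjm
    rw [hmj] at hil
    simp only [List.get_eq_getElem, List.getElem_take, List.getElem_set]
    apply List.getElem?_eq_some_iff.mpr
    refine ⟨hil, ?_⟩
    by_cases hij : i = j
    · subst hij
      rw [if_pos rfl]
      have hd0 := hdiag rfl
      rw [List.getD_eq_getElem _ _ hj] at hd0
      rw [← hd0]
      exact List.getElem_of_eq hmi.symm hil
    · rw [if_neg hij]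
      rw [List.getD_eq_getElem _ _ hj, hmj, List.getD_eq_getElem _ _ hil] at hsym
      exact hsym.symm

theorem asym_row_le (m : List (List Int)) (hA : AsymCond m) :
    ∀ r ∈ m, r.length ≤ m.length := by
  intro r hr
  obtain ⟨i, hi, hri⟩ := List.mem_iff_getElem.mp hr
  have hrd : m.getD i [] = r := by rw [List.getD_eq_getElem _ _ hi, hri]
  rcases Nat.eq_zero_or_pos r.length with h0 | h0
  · omega
  · have := (hA i hi (r.length - 1) (by rw [hrd]; omega)).1
    omega

theorem D_iff (m : List (List Int)) :
    D_isCorrectUploadedFile m ↔ 2 ≤ m.length ∧ ¬ Squarem m ∧ AsymCond m := by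
  unfold D_isCorrectUploadedFile Squarem AsymCond
  constructor
  · rintro ⟨h2, hns, hA⟩
    refine ⟨h2, ?_, fun i hi => (colCond_iff m i hi).mp (hA i hi)⟩
    simp only [List.any_eq_true, decide_eq_true_eq] at hns
    obtain ⟨r, hr, hrl⟩ := hns
    intro hsq
    have := hsq r hr
    omega
  · rintro ⟨h2, hns, hA⟩
    refine ⟨h2, ?_, fun i hi => (colCond_iff m i hi).mpr (hA i hi)⟩
    simp only [List.any_eq_true, decide_eq_true_eq]
    by_contra hc
    push Not at hc
    apply hns
    intro r hr
    have hle := asym_row_le m hA r hr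
    have := hc r hr
    omega

-- the per-entry condition A's inner loop checks at absolute column index j with entry x
def Chk (m : List (List Int)) (i j : Nat) (x : Int) : Prop :=
  j < m.length ∧ i < (m.getD j []).length ∧
  x = (m.getD j []).getD i 0 ∧ (i = j → x = 0)

theorem innerA_true_iff (m : List (List Int)) (i : Nat) (j : Nat) (rest : List Int) :
    innerA m i j rest = true ↔ ∀ k < rest.length, Chk m i (j + k) (rest.getD k 0) := by
  induction rest generalizing j with
  | nil => simp [innerA]
  | cons x rest ih =>
    simp only [innerA, PySem.List.pyGet?_natCast]
    cases hj : m[j]? with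
    | none =>
      simp only [List.getElem?_eq_none_iff] at hj
      constructor
      · intro h; cases h
      · intro h
        have := (h 0 (by simp)).1
        omega
    | some rowj =>
      have hjl : j < m.length := by
        by_contra hc
        rw [List.getElem?_eq_none_iff.2 (by omega)] at hj; cases hj
      have hrowj : rowj = m.getD j [] := by
        rw [List.getD_eq_getElem?_getD, hj]; rfl
      cases hi : rowj[i]? with
      | none =>
        have hil : ¬ i < rowj.length := by
          simpa [List.getElem?_eq_none_iff] using hi
        simp only [hi]
        constructor
        · intro h; cases h
        · intro h
          have := (h 0 (by simp)).2.1
          simp only [Nat.add_zero] at this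
          rw [← hrowj] at this; omega
      | some mji =>
        have hil : i < rowj.length := by
          by_contra hc
          rw [List.getElem?_eq_none_iff.2 (by simpa using hc)] at hi; cases hi
        have hmji : mji = rowj.getD i 0 := by
          rw [List.getD_eq_getElem?_getD]
          rw [hi]; rfl
        simp only [hi]
        by_cases hx : x = mji
        · have hxne : ¬ (x ≠ mji) := fun hc => hc hx
          by_cases hd : i = j ∧ x ≠ 0
          · simp only [if_neg hxne, if_pos hd]
            constructor
            · intro h; cases h
            · intro h
              have := (h 0 (by simp)).2.2.2
              simp only [Nat.add_zero, List.getD_cons_zero] at this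
              exact ((hd.2 (this hd.1))).elim
          · simp only [if_neg hxne, if_neg hd, ih]
            constructor
            · intro h k hk
              cases k with
              | zero =>
                simp only [Nat.add_zero, List.getD_cons_zero]
                refine ⟨hjl, ?_, ?_, ?_⟩
                · rw [← hrowj]; exact hil
                · rw [hx, hmji, hrowj]
                · intro hij
                  by_contra hx0
                  exact hd ⟨hij, hx0⟩
              | succ k =>
                have h2 := h k (by simp only [List.length_cons] at hk; omega)
                have heq : j + (k + 1) = j + 1 + k := by omega
                rw [List.getD_cons_succ, heq]
                exact h2
            · intro h k hk
              have h2 := h (k+1) (by simp only [List.length_cons]; omega)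
              have heq : j + (k + 1) = j + 1 + k := by omega
              rw [List.getD_cons_succ, heq] at h2
              exact h2
        · simp only [if_pos hx]
          constructor
          · intro h; cases h
          · intro h
            have := (h 0 (by simp)).2.2.1
            simp only [Nat.add_zero, List.getD_cons_zero] at this
            rw [← hrowj, ← hmji] at this
            exact (hx this).elim

theorem outerA_true_iff (m : List (List Int)) (i : Nat) (rest : List (List Int)) :
    outerA m i rest = true ↔ ∀ k < rest.length, innerA m (i + k) 0 (rest.getD k []) = true := by
  induction rest generalizing i with
  | nil => simp [outerA]
  | cons rowi rest ih =>
    simp only [outerA, Bool.and_eq_true, ih]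
    constructor
    · rintro ⟨h1, h2⟩ k hk
      cases k with
      | zero => simpa using h1
      | succ k =>
        have h2k := h2 k (by simp only [List.length_cons] at hk; omega)
        have heq : i + (k + 1) = i + 1 + k := by omega
        rw [List.getD_cons_succ, heq]
        exact h2k
    · intro h
      refine ⟨by simpa using h 0 (by simp), fun k hk => ?_⟩
      have h2 := h (k+1) (by simp only [List.length_cons]; omega)
      have heq : i + (k + 1) = i + 1 + k := by omega
      rw [List.getD_cons_succ, heq] at h2
      exact h2

theorem A_true_iff (m : List (List Int)) :
    isCorrectUploadedFile m = true ↔ 2 ≤ m.length ∧ AsymCond m := by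
  unfold isCorrectUploadedFile
  by_cases h2 : m.length < 2
  · simp only [if_pos h2, Bool.false_eq_true, false_iff, not_and]
    intro hc; omega
  · rw [if_neg h2, outerA_true_iff]
    simp only [innerA_true_iff, Nat.zero_add]
    unfold AsymCond Chk
    constructor
    · intro h; exact ⟨by omega, h⟩
    · exact fun h => h.2

theorem zipStar_eq_iff (m : List (List Int)) (hne : m ≠ []) :
    m = zipStar m ↔ Squarem m ∧
      ∀ i < m.length, ∀ j < m.length, (m.getD i []).getD j 0 = (m.getD j []).getD i 0 := by
  unfold zipStar
  cases hk : (m.map List.length).min? with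
  | none =>
    rw [List.min?_eq_none_iff] at hk
    simp only [List.map_eq_nil_iff] at hk
    exact absurd hk hne
  | some k =>
    have hmem : k ∈ m.map List.length := (List.min?_eq_some_iff.mp hk).1
    have hle : ∀ b ∈ m.map List.length, k ≤ b := (List.min?_eq_some_iff.mp hk).2
    constructor
    · intro h
      have hlen : m.length = k := by
        have := congrArg List.length h
        simpa using this
      have hrow : ∀ i, i < k → m.getD i [] = m.map (fun r => r.getD i 0) := by
        intro i hi
        have hcongr := congrArg (fun l => l.getD i ([] : List Int)) h
        simp only at hcongr
        rw [hcongr, List.getD_eq_getElem _ _ (by simpa using hi)]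
        simp
      have hsq : Squarem m := by
        intro r hr
        obtain ⟨i, hi, hri⟩ := List.mem_iff_getElem.mp hr
        have : m.getD i [] = r := by rw [List.getD_eq_getElem _ _ hi, hri]
        rw [← this, hrow i (by omega)]
        simp
      refine ⟨hsq, fun i hi j hj => ?_⟩
      rw [hrow i (by omega), List.getD_eq_getElem _ _ (by simpa using hj)]
      simp only [List.getElem_map]
      rw [List.getD_eq_getElem _ _ hj]
    · rintro ⟨hsq, hsym⟩
      have hlen : k = m.length := by
        obtain ⟨r, hr, hrk⟩ := List.mem_map.mp hmem
        rw [← hrk]; exact hsq r hr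
      apply List.ext_getElem
      · simp [hlen]
      · intro i hi _
        have hik : i < k := by omega
        rw [List.getElem_map, List.getElem_range]
        apply List.ext_getElem
        · have := hsq m[i] (List.getElem_mem hi)
          simpa using this
        · intro j hj hj'
          have hjm : j < m.length := by simpa using hj'
          have hsij := hsym i hi j hjm
          rw [List.getD_eq_getElem _ _ hi, List.getD_eq_getElem _ _ hjm] at hsij
          have hjlen : j < (m[i]).length := hj
          have hilen : i < (m[j]).length := by
            have := hsq m[j] (List.getElem_mem hjm)
            omega
          rw [List.getD_eq_getElem _ _ hjlen, List.getD_eq_getElem _ _ hilen] at hsij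
          simp only [List.getElem_map]
          rw [hsij, List.getD_eq_getElem _ _ hilen]

theorem B_true_iff (m : List (List Int)) :
    isCorrectUploadedFile_alt m = true ↔ 2 ≤ m.length ∧ Squarem m ∧
      (∀ i < m.length, ∀ j < m.length, (m.getD i []).getD j 0 = (m.getD j []).getD i 0) ∧
      (∀ i < m.length, (m.getD i []).getD i 0 = 0) := by
  unfold isCorrectUploadedFile_alt
  by_cases h2 : m.length < 2
  · simp only [if_pos h2, Bool.false_eq_true, false_iff, not_and]
    intro hc; omega
  · rw [if_neg h2]
    have hne : m ≠ [] := by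
      intro h; rw [h] at h2; simp at h2
    simp only [Bool.and_eq_true, decide_eq_true_eq, List.all_eq_true, List.mem_range,
      beq_iff_eq]
    rw [zipStar_eq_iff m hne]
    constructor
    · rintro ⟨⟨hsq, hsym⟩, hdiag⟩; exact ⟨by omega, hsq, hsym, hdiag⟩
    · rintro ⟨_, hsq, hsym, hdiag⟩; exact ⟨⟨hsq, hsym⟩, hdiag⟩

theorem B_true_imp (m : List (List Int)) (h : isCorrectUploadedFile_alt m = true) :
    2 ≤ m.length ∧ Squarem m ∧ AsymCond m := by
  obtain ⟨h2, hsq, hsym, hdiag⟩ := (B_true_iff m).mp h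
  refine ⟨h2, hsq, fun i hi j hj => ?_⟩
  have hrl : ∀ p, p < m.length → (m.getD p []).length = m.length := by
    intro p hp
    rw [List.getD_eq_getElem _ _ hp]
    exact hsq _ (List.getElem_mem hp)
  have hjn : j < m.length := by rw [hrl i hi] at hj; exact hj
  refine ⟨hjn, by rw [hrl j hjn]; exact hi, hsym i hi j hjn, fun hij => ?_⟩
  subst hij
  exact hdiag i hi

-- ===== VERDICT (by name: the statement is the Claim_ definition above) =====
theorem isCorrectUploadedFile_spec : Claim_unchanged_isCorrectUploadedFile := by
  intro m _ hnd
  by_cases hb : isCorrectUploadedFile_alt m = true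
  · obtain ⟨h2, hsq, hasym⟩ := B_true_imp m hb
    rw [hb, (A_true_iff m).mpr ⟨h2, hasym⟩]
  · by_cases ha : isCorrectUploadedFile m = true
    · obtain ⟨h2, hasym⟩ := (A_true_iff m).mp ha
      have hsq : Squarem m := by
        by_contra hns
        exact hnd ((D_iff m).mpr ⟨h2, hns, hasym⟩)
      have hrl : ∀ p, p < m.length → (m.getD p []).length = m.length := by
        intro p hp
        rw [List.getD_eq_getElem _ _ hp]
        exact hsq _ (List.getElem_mem hp)
      have hb' : isCorrectUploadedFile_alt m = true :=
        (B_true_iff m).mpr ⟨h2, hsq,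
          fun i hi j hj => (hasym i hi j (by rw [hrl i hi]; exact hj)).2.2.1,
          fun i hi => (hasym i hi i (by rw [hrl i hi]; exact hi)).2.2.2 rfl⟩
      exact absurd hb' hb
    · simp only [Bool.not_eq_true] at ha hb
      rw [ha, hb]

theorem isCorrectUploadedFile_changed : Claim_changed_isCorrectUploadedFile := by
  unfold Claim_changed_isCorrectUploadedFile; decide

theorem isCorrectUploadedFile_tight : Claim_exact_isCorrectUploadedFile := by
  intro m _ hd
  obtain ⟨h2, hns, hasym⟩ := (D_iff m).mp hd
  have ha : isCorrectUploadedFile m = true := (A_true_iff m).mpr ⟨h2, hasym⟩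
  intro heq
  have hb : isCorrectUploadedFile_alt m = true := by rw [← heq]; exact ha
  exact hns (B_true_imp m hb).2.1
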